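-- pv_equiv track=rewrite | github.com/tuxx42/pymemexec | pymemexec.py | prot_str
-- ===== SOURCE A (Python) =====
-- PROT_EXEC = 0x1
--
-- PROT_WRITE = 0x2
--
-- PROT_READ = 0x4
--
-- def prot_str(prot):
--     perms = (
--         (PROT_READ, 'r'),
--         (PROT_WRITE, 'w'),
--         (PROT_EXEC, 'x')
--     )
--
--     return ''.join(
--         c if prot & p else '-' for p, c in perms
--     )
-- ===== SOURCE B (Python) =====
-- PROT_EXEC = 0x1
--
-- PROT_WRITE = 0x2
--
-- PROT_READ = 0x4
--
-- TBL = ['---', '--x', '-w-', '-wx', 'r--', 'r-x', 'rw-', 'rwx']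
--
--
-- def prot_str(prot):
--     return TBL[prot & 7]
-- ===== Notes on version B (the rewrite author's own statement) =====
-- stated objective: idiomatic
-- what changed: Replaces the per-flag generator/join over (mask, char) pairs with a precomputed lookup table of all possible permission strings indexed by the low three protection bits, so no per-call loop or string building remains.
import Mathlib
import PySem

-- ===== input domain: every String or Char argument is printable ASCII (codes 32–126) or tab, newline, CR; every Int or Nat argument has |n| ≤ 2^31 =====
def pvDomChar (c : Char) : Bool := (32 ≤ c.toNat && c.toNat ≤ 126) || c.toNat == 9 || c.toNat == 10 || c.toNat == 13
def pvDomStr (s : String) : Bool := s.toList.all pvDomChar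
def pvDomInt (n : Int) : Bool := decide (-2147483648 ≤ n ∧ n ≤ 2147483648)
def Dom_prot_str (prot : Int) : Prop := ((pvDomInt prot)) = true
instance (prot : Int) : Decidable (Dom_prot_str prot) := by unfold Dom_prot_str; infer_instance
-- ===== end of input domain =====

-- B replaces A's per-flag generator/join with a precomputed 8-entry table indexed by prot & 7 (idiomatic; same cost).

-- ===== PORT A =====
def prot_str (prot : Int) : String :=
  let perms : List (Int × String) := [(4, "r"), (2, "w"), (1, "x")]
  PySem.Str.join "" (perms.map (fun pc => if PySem.Int.band prot pc.1 ≠ 0 then pc.2 else "-"))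

-- ===== PORT B =====
def pvTBL : List String := ["---", "--x", "-w-", "-wx", "r--", "r-x", "rw-", "rwx"]

def prot_str_alt (prot : Int) : String :=
  (PySem.List.pyGet? pvTBL (PySem.Int.band prot 7)).getD ""  -- index is always 0..7, so the getD default never fires

-- ===== PRECONDITION & SPEC =====
def Spec_prot_str (prot : Int) (out : String) : Prop := out = prot_str_alt prot
instance (prot : Int) (out : String) : Decidable (Spec_prot_str prot out) := by unfold Spec_prot_str; infer_instance

-- ===== CLAIM (what is proved, stated in full; the proofs are below) =====
def Claim_equal_prot_str : Prop := ∀ (prot : Int), Dom_prot_str prot → Spec_prot_str prot (prot_str prot)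

-- ===== LEMMAS AND PROOFS =====
theorem pv_tb (n i : ℕ) : (n.testBit i).toNat = n / 2 ^ i % 2 := by
  rw [Nat.testBit_eq_decide_div_mod_eq]
  rcases Nat.mod_two_eq_zero_or_one (n / 2 ^ i) with h | h <;> simp [h]

theorem pv_and7 (n : ℕ) : n &&& 7 = n % 8 := Nat.and_two_pow_sub_one_eq_mod n 3

theorem pv_and4 (n : ℕ) : n &&& 4 = n / 4 % 2 * 4 := by
  have := Nat.and_two_pow n 2; norm_num at this; rw [this, pv_tb]; norm_num

theorem pv_and2 (n : ℕ) : n &&& 2 = n / 2 % 2 * 2 := by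
  have := Nat.and_two_pow n 1; norm_num at this; rw [this, pv_tb]; norm_num

theorem pv_and1 (n : ℕ) : n &&& 1 = n % 2 := Nat.and_two_pow_sub_one_eq_mod n 1

-- band a b depends only on a's low three bits when b < 8
theorem pv_band7 (a : Int) : PySem.Int.band a 7 = PySem.Int.band (a % 8) 7 := by
  unfold PySem.Int.band
  by_cases h : 0 ≤ a
  · simp only [if_pos h, if_pos (show (0:Int) ≤ 7 by norm_num),
      if_pos (Int.emod_nonneg a (by norm_num : (8:Int) ≠ 0))]
    rw [show Int.toNat 7 = 7 from rfl, pv_and7, pv_and7]; omega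
  · simp only [if_neg h, if_pos (show (0:Int) ≤ 7 by norm_num),
      if_pos (Int.emod_nonneg a (by norm_num : (8:Int) ≠ 0))]
    rw [show Int.toNat 7 = 7 from rfl, Nat.and_comm, pv_and7, pv_and7]; omega

theorem pv_band4 (a : Int) : PySem.Int.band a 4 = PySem.Int.band (a % 8) 4 := by
  unfold PySem.Int.band
  by_cases h : 0 ≤ a
  · simp only [if_pos h, if_pos (show (0:Int) ≤ 4 by norm_num),
      if_pos (Int.emod_nonneg a (by norm_num : (8:Int) ≠ 0))]
    rw [show Int.toNat 4 = 4 from rfl, pv_and4, pv_and4]; omega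
  · simp only [if_neg h, if_pos (show (0:Int) ≤ 4 by norm_num),
      if_pos (Int.emod_nonneg a (by norm_num : (8:Int) ≠ 0))]
    rw [show Int.toNat 4 = 4 from rfl, Nat.and_comm, pv_and4, pv_and4]; omega

theorem pv_band2 (a : Int) : PySem.Int.band a 2 = PySem.Int.band (a % 8) 2 := by
  unfold PySem.Int.band
  by_cases h : 0 ≤ a
  · simp only [if_pos h, if_pos (show (0:Int) ≤ 2 by norm_num),
      if_pos (Int.emod_nonneg a (by norm_num : (8:Int) ≠ 0))]
    rw [show Int.toNat 2 = 2 from rfl, pv_and2, pv_and2]; omega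
  · simp only [if_neg h, if_pos (show (0:Int) ≤ 2 by norm_num),
      if_pos (Int.emod_nonneg a (by norm_num : (8:Int) ≠ 0))]
    rw [show Int.toNat 2 = 2 from rfl, Nat.and_comm, pv_and2, pv_and2]; omega

theorem pv_band1 (a : Int) : PySem.Int.band a 1 = PySem.Int.band (a % 8) 1 := by
  unfold PySem.Int.band
  by_cases h : 0 ≤ a
  · simp only [if_pos h, if_pos (show (0:Int) ≤ 1 by norm_num),
      if_pos (Int.emod_nonneg a (by norm_num : (8:Int) ≠ 0))]
    rw [show Int.toNat 1 = 1 from rfl, pv_and1, pv_and1]; omega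
  · simp only [if_neg h, if_pos (show (0:Int) ≤ 1 by norm_num),
      if_pos (Int.emod_nonneg a (by norm_num : (8:Int) ≠ 0))]
    rw [show Int.toNat 1 = 1 from rfl, Nat.and_comm, pv_and1, pv_and1]; omega

-- ===== VERDICT (by name: the statement is the Claim_ definition above) =====
theorem prot_str_spec : Claim_equal_prot_str := by
  intro prot _
  unfold Spec_prot_str prot_str prot_str_alt
  have h0 : 0 ≤ prot % 8 := Int.emod_nonneg prot (by norm_num)
  have h8 : prot % 8 < 8 := Int.emod_lt_of_pos prot (by norm_num)
  simp only [List.map, pv_band4 prot, pv_band2 prot, pv_band1 prot, pv_band7 prot]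
  set r := prot % 8 with hr
  clear_value r
  interval_cases r <;> decide
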